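-- pv_equiv track=rewrite | github.com/tamirMoshiashvili/DL_ex2 | utils.py | get_test_set
-- ===== SOURCE A (Python) =====
-- START = '_START_'
--
-- END = '_END_'
--
-- def get_test_set(file_lines):
--     """
--     NOTE -  each line in file_lines is a single word,
--             this function is for test data.
--     :param file_lines: list of lines, each line is 'word' or ''
--     :return: list of sentences.
--     """
--     sentence = []
--     lines = []
--
--     file_lines.append('')
--     for line in file_lines:
--         if line == '':
--             # start tags
--             sentence.insert(0, START)
--             sentence.insert(0, START)
--
--             # end tags
--             sentence.extend([END, END])
--
--             # insert the current tuple (sentence, tags) and clear the lists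
--             lines.append(sentence)
--             sentence = []
--         else:
--             sentence.append(line)
--     return lines
-- ===== SOURCE B (Python) =====
-- START = '_START_'
--
-- END = '_END_'
--
--
-- def get_test_set(file_lines):
--     # Same mutation as A: a trailing '' is appended to the caller's list.
--     file_lines.append('')
--     return [[START, START] + s + [END, END] for s in _split(file_lines)]
--
--
-- def _split(lines):
--     # lines is [] or ends with '' (invariant from the appended sentinel).
--     if not lines:
--         return []
--     i = lines.index('')
--     return [lines[:i]] + _split(lines[i + 1:])
-- ===== Notes on version B (the rewrite author's own statement) =====
-- stated objective: alternative
-- what changed: B is a two-stage decomposition: a recursive splitter cuts the padded list into sentences at each '' via list.index and slicing, and a comprehension then wraps every sentence with the START/END padding, replacing A's single loop with insert(0)/extend accumulator bookkeeping.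
import Mathlib
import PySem

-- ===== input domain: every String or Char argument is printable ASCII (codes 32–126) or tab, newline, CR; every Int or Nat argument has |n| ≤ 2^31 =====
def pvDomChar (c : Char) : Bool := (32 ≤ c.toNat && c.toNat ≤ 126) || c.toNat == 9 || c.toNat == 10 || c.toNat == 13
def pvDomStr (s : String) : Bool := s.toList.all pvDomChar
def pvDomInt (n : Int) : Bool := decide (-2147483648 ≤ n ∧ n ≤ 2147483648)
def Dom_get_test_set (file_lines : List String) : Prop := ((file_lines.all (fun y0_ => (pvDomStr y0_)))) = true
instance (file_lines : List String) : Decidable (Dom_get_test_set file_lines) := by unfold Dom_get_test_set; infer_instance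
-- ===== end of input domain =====

-- ===== PORT A =====
-- B splits the padded list on '' recursively and maps the padding in a second stage (return-value
-- equivalence; both Pythons append '' to the caller's list, a side effect not modelled here).
def get_test_set (file_lines : List String) : List (List String) :=
  let fl := file_lines ++ [""]
  (fl.foldl (fun (st : List String × List (List String)) line =>
      if line == "" then
        ([], st.2 ++ [["_START_", "_START_"] ++ st.1 ++ ["_END_", "_END_"]])
      else (st.1 ++ [line], st.2)) ([], [])).2

-- ===== PORT B =====
-- _split of Source B; Python raises ValueError when a nonempty argument lacks '' — that branch is
-- unreachable under Source B's invariant and ports to the `none => []` arm.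
def gtsSplit (lines : List String) : List (List String) :=
  match h : PySem.List.index? lines "" with
  | none => []
  | some i => [lines.take i] ++ gtsSplit (lines.drop (i + 1))
termination_by lines.length
decreasing_by
  have := PySem.List.getElem_of_index?_eq_some h
  obtain ⟨hk, -, -⟩ := this
  simp [List.length_drop]; omega

def get_test_set_alt (file_lines : List String) : List (List String) :=
  let fl := file_lines ++ [""]
  (gtsSplit fl).map (fun s => ["_START_", "_START_"] ++ s ++ ["_END_", "_END_"])

-- ===== PRECONDITION & SPEC =====
def Spec_get_test_set (file_lines : List String) (out : List (List String)) : Prop := out = get_test_set_alt file_lines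
instance (file_lines : List String) (out : List (List String)) : Decidable (Spec_get_test_set file_lines out) := by unfold Spec_get_test_set; infer_instance

-- ===== CLAIM (what is proved, stated in full; the proofs are below) =====
def Claim_equal_get_test_set : Prop := ∀ (file_lines : List String), Dom_get_test_set file_lines → Spec_get_test_set file_lines (get_test_set file_lines)

-- ===== LEMMAS AND PROOFS =====

def gtsPad (s : List String) : List String := ["_START_", "_START_"] ++ s ++ ["_END_", "_END_"]

-- head-adjusted map of gtsSplit: the first chunk gets the pending prefix `pre`
def gtsP (pre : List String) (lines : List String) : List (List String) :=
  match gtsSplit lines with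
  | [] => []
  | c :: cs => gtsPad (pre ++ c) :: cs.map gtsPad

lemma gtsSplit_eq_none (lines : List String) (h : PySem.List.index? lines "" = none) :
    gtsSplit lines = [] := by
  rw [gtsSplit]
  split
  · rfl
  · rename_i i h2; rw [h] at h2; cases h2

lemma gtsSplit_eq_some (lines : List String) (i : Nat)
    (h : PySem.List.index? lines "" = some i) :
    gtsSplit lines = lines.take i :: gtsSplit (lines.drop (i + 1)) := by
  rw [gtsSplit]
  split
  · rename_i h2; rw [h] at h2; cases h2
  · rename_i j h2; rw [h] at h2; injection h2 with h3; subst h3; rfl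

lemma gtsSplit_nil : gtsSplit [] = [] :=
  gtsSplit_eq_none [] (by simp)

lemma gtsSplit_cons_blank (rest : List String) :
    gtsSplit ("" :: rest) = [] :: gtsSplit rest := by
  rw [gtsSplit_eq_some _ 0 (PySem.List.index?_cons_self "" rest)]
  simp

lemma gtsSplit_cons_ne (l : String) (rest : List String) (hl : l ≠ "") :
    gtsSplit (l :: rest) =
      match gtsSplit rest with
      | [] => []
      | c :: cs => (l :: c) :: cs := by
  rcases h : PySem.List.index? rest "" with _ | i
  · rw [gtsSplit_eq_none _ (by rw [PySem.List.index?_cons_of_ne rest hl, h]; rfl),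
       gtsSplit_eq_none rest h]
  · rw [gtsSplit_eq_some _ (i + 1) (by rw [PySem.List.index?_cons_of_ne rest hl, h]; rfl),
       gtsSplit_eq_some rest i h]
    simp

lemma gtsP_nil_eq (lines : List String) :
    gtsP [] lines = (gtsSplit lines).map gtsPad := by
  unfold gtsP
  rcases h : gtsSplit lines with _ | ⟨c, cs⟩ <;> simp

lemma gts_loop (lines : List String) :
    ∀ (pre : List String) (acc : List (List String)),
      (lines.foldl (fun (st : List String × List (List String)) line =>
          if line == "" then
            ([], st.2 ++ [["_START_", "_START_"] ++ st.1 ++ ["_END_", "_END_"]])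
          else (st.1 ++ [line], st.2)) (pre, acc)).2
        = acc ++ gtsP pre lines := by
  induction lines with
  | nil => intro pre acc; simp [gtsP, gtsSplit_nil]
  | cons l rest ih =>
    intro pre acc
    by_cases hl : l = ""
    · subst hl
      simp only [List.foldl_cons, beq_self_eq_true, if_pos]
      rw [ih, gtsP_nil_eq]
      simp [gtsP, gtsSplit_cons_blank, gtsPad]
    · have hbeq : (l == "") = false := by simp [hl]
      simp only [List.foldl_cons, hbeq, Bool.false_eq_true, reduceIte]
      rw [ih]
      unfold gtsP
      rw [gtsSplit_cons_ne l rest hl]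
      rcases h : gtsSplit rest with _ | ⟨c, cs⟩ <;> simp

-- ===== VERDICT (by name: the statement is the Claim_ definition above) =====
theorem get_test_set_spec : Claim_equal_get_test_set := by
  intro fl _
  unfold Spec_get_test_set get_test_set get_test_set_alt
  rw [gts_loop (fl ++ [""]) [] [], gtsP_nil_eq]
  simp [gtsPad]
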